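-- pv_equiv track=rewrite | github.com/PizzaPoot/Pyhon-II-kursus | 5.3c.py | kooslubajad
-- ===== SOURCE A (Python) =====
-- def kooslubajad(sets):
--     max_similar = 0
--     max_indexes = (0, 1)
--     for i in range(len(sets)):
--         for j in range(i+1, len(sets)):
--             similar_elements = len(sets[i] & sets[j])
--             if similar_elements > max_similar:
--                 max_similar = similar_elements
--                 max_indexes = (i, j)
--
--     return max_indexes
-- ===== SOURCE B (Python) =====
-- def kooslubajad(sets):
--     # Inverted index: for each element, the (increasing) list of set indices containing it;
--     # count co-occurring index pairs per shared element, then pick max count, lex-smallest pair.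
--     occ = {}
--     for i in range(len(sets)):
--         for x in sets[i]:
--             if x in occ:
--                 idxs = occ[x]
--                 if idxs[-1] != i:
--                     occ[x] = idxs + [i]
--             else:
--                 occ[x] = [i]
--     cnt = {}
--     for x, idxs in occ.items():
--         for a in range(len(idxs)):
--             for b in range(a + 1, len(idxs)):
--                 p = (idxs[a], idxs[b])
--                 cnt[p] = cnt.get(p, 0) + 1
--     bestc = 0
--     best = (0, 1)
--     for p, c in cnt.items():
--         if c > bestc or (c == bestc and p < best):
--             bestc = c
--             best = p
--     return best
-- ===== Notes on version B (the rewrite author's own statement) =====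
-- stated objective: alternative
-- what changed: Replaces the all-pairs set-intersection scan by an inverted index (element -> list of containing set indices) that counts co-occurring index pairs once per shared element and then selects the pair with maximum count, lex-smallest on ties.
import Mathlib
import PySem

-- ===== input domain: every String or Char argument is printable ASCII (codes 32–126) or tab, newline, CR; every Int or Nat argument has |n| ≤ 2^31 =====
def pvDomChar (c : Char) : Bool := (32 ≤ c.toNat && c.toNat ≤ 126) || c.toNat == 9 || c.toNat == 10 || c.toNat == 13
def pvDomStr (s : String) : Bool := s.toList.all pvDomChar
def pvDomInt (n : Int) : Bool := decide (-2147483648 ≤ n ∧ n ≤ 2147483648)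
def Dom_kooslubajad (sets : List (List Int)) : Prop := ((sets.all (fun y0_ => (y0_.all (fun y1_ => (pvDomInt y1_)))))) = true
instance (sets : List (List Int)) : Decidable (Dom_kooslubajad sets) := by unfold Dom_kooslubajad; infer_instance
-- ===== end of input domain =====

-- B replaces A's all-pairs set-intersection scan by an inverted index that counts
-- co-occurring index pairs per shared element, then picks the max-count, lex-smallest pair.
-- ===== PORT A =====
def kooslubajad (sets : List (List Int)) : List Int :=
  let st := (PySem.List.pyRange 0 sets.length 1).foldl (fun st i =>
    (PySem.List.pyRange (i+1) sets.length 1).foldl (fun st j =>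
      let similar : Int := (PySem.Set.inter (PySem.Set.ofList (PySem.List.pyGetD sets i []))
        (PySem.List.pyGetD sets j [])).length
      if similar > st.1 then (similar, (i, j)) else st) st)
    ((0 : Int), ((0 : Int), (1 : Int)))
  [st.2.1, st.2.2]

-- ===== PORT B =====
def kooslubajad_alt (sets : List (List Int)) : List Int :=
  let occ : PySem.Dict Int (List Int) :=
    (PySem.List.pyRange 0 sets.length 1).foldl (fun occ i =>
      (PySem.List.pyGetD sets i []).foldl (fun occ x =>
        match occ.get? x with
        | some idxs => if PySem.List.pyGetD idxs (-1) (-1) != i then occ.insert x (idxs ++ [i]) else occ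
        | none => occ.insert x [i]) occ) PySem.Dict.empty
  let cnt : PySem.Dict (Int × Int) Int :=
    occ.items.foldl (fun cnt xi =>
      (PySem.List.pyRange 0 xi.2.length 1).foldl (fun cnt a =>
        (PySem.List.pyRange (a+1) xi.2.length 1).foldl (fun cnt b =>
          let p := (PySem.List.pyGetD xi.2 a 0, PySem.List.pyGetD xi.2 b 0)
          cnt.insert p (cnt.getD p 0 + 1)) cnt) cnt) PySem.Dict.empty
  let st := cnt.items.foldl (fun st pc =>
      if pc.2 > st.1 ∨ (pc.2 = st.1 ∧ (pc.1.1 < st.2.1 ∨ (pc.1.1 = st.2.1 ∧ pc.1.2 < st.2.2)))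
      then (pc.2, pc.1) else st)
    ((0 : Int), ((0 : Int), (1 : Int)))
  [st.2.1, st.2.2]

-- ===== PRECONDITION & SPEC =====
def Spec_kooslubajad (sets : List (List Int)) (out : List Int) : Prop := out = kooslubajad_alt sets
instance (sets : List (List Int)) (out : List Int) : Decidable (Spec_kooslubajad sets out) := by unfold Spec_kooslubajad; infer_instance

-- ===== CLAIM (what is proved, stated in full; the proofs are below) =====
def Claim_equal_kooslubajad : Prop := ∀ (sets : List (List Int)), Dom_kooslubajad sets → Spec_kooslubajad sets (kooslubajad sets)

-- ===== LEMMAS AND PROOFS =====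

-- Abbreviations used by the proofs only.
def pvS (sets : List (List Int)) (i : Int) : List Int := PySem.List.pyGetD sets i []

def pvC (sets : List (List Int)) (p : Int × Int) : Int :=
  ((PySem.Set.inter (PySem.Set.ofList (pvS sets p.1)) (pvS sets p.2)).length : Int)

def pvPairs (lo hi : Int) : List (Int × Int) :=
  (PySem.List.pyRange lo hi 1).flatMap (fun i => (PySem.List.pyRange (i+1) hi 1).map (fun j => (i, j)))

def pvLexLt (p q : Int × Int) : Prop := p.1 < q.1 ∨ (p.1 = q.1 ∧ p.2 < q.2)

def pvStepA (c : Int × Int → Int) (st : Int × (Int × Int)) (p : Int × Int) : Int × (Int × Int) :=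
  if c p > st.1 then (c p, p) else st

def pvStepB (st : Int × (Int × Int)) (pc : (Int × Int) × Int) : Int × (Int × Int) :=
  if pc.2 > st.1 ∨ (pc.2 = st.1 ∧ (pc.1.1 < st.2.1 ∨ (pc.1.1 = st.2.1 ∧ pc.1.2 < st.2.2)))
  then (pc.2, pc.1) else st

def pvBetter (s t : Int × (Int × Int)) : Prop :=
  t.1 < s.1 ∨ (s.1 = t.1 ∧ (s.2.1 < t.2.1 ∨ (s.2.1 = t.2.1 ∧ s.2.2 < t.2.2)))

def pvOccP (sets : List (List Int)) (k : Int) (x : Int) : List Int :=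
  (PySem.List.pyRange 0 k 1).filter (fun i => (pvS sets i).contains x)

def pvVal (sets : List (List Int)) (k : Int) (ys : List Int) (x : Int) : Option (List Int) :=
  if pvOccP sets k x = [] ∧ x ∉ ys then none
  else some (pvOccP sets k x ++ if x ∈ ys then [(k : Int)] else [])

-- verbatim copies of the two intermediate dicts of kooslubajad_alt
def pvOcc (sets : List (List Int)) : PySem.Dict Int (List Int) :=
  (PySem.List.pyRange 0 sets.length 1).foldl (fun occ i =>
    (PySem.List.pyGetD sets i []).foldl (fun occ x =>
      match occ.get? x with
      | some idxs => if PySem.List.pyGetD idxs (-1) (-1) != i then occ.insert x (idxs ++ [i]) else occ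
      | none => occ.insert x [i]) occ) PySem.Dict.empty

def pvCnt (sets : List (List Int)) : PySem.Dict (Int × Int) Int :=
  (pvOcc sets).items.foldl (fun cnt xi =>
    (PySem.List.pyRange 0 xi.2.length 1).foldl (fun cnt a =>
      (PySem.List.pyRange (a+1) xi.2.length 1).foldl (fun cnt b =>
        let p := (PySem.List.pyGetD xi.2 a 0, PySem.List.pyGetD xi.2 b 0)
        cnt.insert p (cnt.getD p 0 + 1)) cnt) cnt) PySem.Dict.empty

def pvE (sets : List (List Int)) : List (Int × Int) :=
  (pvOcc sets).items.flatMap (fun xi =>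
    (pvPairs 0 xi.2.length).map (fun ab =>
      (PySem.List.pyGetD xi.2 ab.1 0, PySem.List.pyGetD xi.2 ab.2 0)))

-- generic fold lemmas
theorem pv_foldl_flatMap {α β γ : Type} (l : List α) (g : α → List β) (f : γ → β → γ) (init : γ) :
    (l.flatMap g).foldl f init = l.foldl (fun acc x => (g x).foldl f acc) init := by
  induction l generalizing init with
  | nil => rfl
  | cons hd tl ih => simp [List.flatMap_cons, List.foldl_append, ih]

theorem pv_nested_pairs_foldl {γ : Type} (lo hi : Int) (F : γ → Int × Int → γ) (init : γ) :
    (PySem.List.pyRange lo hi 1).foldl (fun acc i =>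
      (PySem.List.pyRange (i+1) hi 1).foldl (fun acc j => F acc (i, j)) acc) init
    = (pvPairs lo hi).foldl F init := by
  rw [pvPairs, pv_foldl_flatMap]
  exact (PySem.List.foldl_congr_mem _ _ _ _ (fun acc i _ => by rw [List.foldl_map])).symm

-- A-port reduction
theorem pv_kooslubajad_eq (sets : List (List Int)) :
    kooslubajad sets =
      (let st := (pvPairs 0 sets.length).foldl (pvStepA (pvC sets)) ((0 : Int), ((0 : Int), (1 : Int)))
       [st.2.1, st.2.2]) := by
  exact congrArg (fun st : Int × (Int × Int) => [st.2.1, st.2.2])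
    (pv_nested_pairs_foldl 0 (sets.length : Int) (pvStepA (pvC sets))
      ((0 : Int), ((0 : Int), (1 : Int))))

-- B-port reduction
theorem pv_kooslubajad_alt_eq (sets : List (List Int)) :
    kooslubajad_alt sets =
      (let st := (pvCnt sets).items.foldl pvStepB ((0 : Int), ((0 : Int), (1 : Int)))
       [st.2.1, st.2.2]) := rfl

-- membership / order facts about pvPairs and pvOccP
theorem pv_mem_pvPairs {lo hi : Int} {p : Int × Int} :
    p ∈ pvPairs lo hi ↔ lo ≤ p.1 ∧ p.1 < p.2 ∧ p.2 < hi := by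
  obtain ⟨i, j⟩ := p
  simp only [pvPairs, List.mem_flatMap, List.mem_map, PySem.List.mem_pyRange_one, Prod.mk.injEq]
  constructor
  · rintro ⟨a, ⟨ha1, ha2⟩, b, ⟨hb1, hb2⟩, rfl, rfl⟩; omega
  · rintro ⟨h1, h2, h3⟩; exact ⟨i, ⟨h1, by omega⟩, j, ⟨by omega, h3⟩, rfl, rfl⟩

theorem pv_pvPairs_pairwise (lo hi : Int) : (pvPairs lo hi).Pairwise pvLexLt := by
  rw [pvPairs, List.pairwise_flatMap]
  constructor
  · intro a _
    rw [List.pairwise_map]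
    exact (PySem.List.pairwise_lt_pyRange_one _ _).imp (fun h => Or.inr ⟨rfl, h⟩)
  · refine (PySem.List.pairwise_lt_pyRange_one _ _).imp ?_
    rintro a b hab x hx y hy
    simp only [List.mem_map] at hx hy
    obtain ⟨j1, _, rfl⟩ := hx
    obtain ⟨j2, _, rfl⟩ := hy
    exact Or.inl hab

theorem pv_pvPairs_nodup (lo hi : Int) : (pvPairs lo hi).Nodup := by
  refine (pv_pvPairs_pairwise lo hi).imp ?_
  intro a b h hn; subst hn; rcases h with h | ⟨_, h⟩ <;> omega

theorem pv_pvOccP_pairwise (sets : List (List Int)) (k x : Int) :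
    (pvOccP sets k x).Pairwise (· < ·) :=
  (PySem.List.pairwise_lt_pyRange_one 0 k).filter _

theorem pv_mem_pvOccP {sets : List (List Int)} {k x i : Int} :
    i ∈ pvOccP sets k x ↔ 0 ≤ i ∧ i < k ∧ x ∈ pvS sets i := by
  simp only [pvOccP, List.mem_filter, PySem.List.mem_pyRange_one, List.contains_iff_mem]
  tauto

-- occ characterisation
theorem pv_pvOccP_succ (sets : List (List Int)) (k : Int) (hk : 0 ≤ k) (x : Int) :
    pvOccP sets (k+1) x = pvOccP sets k x ++ (if x ∈ pvS sets k then [k] else []) := by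
  unfold pvOccP
  rw [PySem.List.pyRange_one_succ_right hk, List.filter_append]
  congr 1
  by_cases hm : x ∈ pvS sets k <;> simp [hm]

theorem pv_pvVal_ne (sets : List (List Int)) (k : Int) {ys : List Int} {x0 x : Int}
    (hx : x ≠ x0) : pvVal sets k (ys ++ [x0]) x = pvVal sets k ys x := by
  unfold pvVal
  have hmem : (x ∈ ys ++ [x0]) ↔ x ∈ ys := by simp [hx]
  simp only [hmem]

theorem pv_pvVal_memdup (sets : List (List Int)) (k : Int) {ys : List Int} {x0 : Int}
    (hys : x0 ∈ ys) (x : Int) : pvVal sets k (ys ++ [x0]) x = pvVal sets k ys x := by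
  unfold pvVal
  have hmem : (x ∈ ys ++ [x0]) ↔ x ∈ ys := by
    simp only [List.mem_append, List.mem_singleton]
    constructor
    · rintro (h | rfl)
      · exact h
      · exact hys
    · exact Or.inl
  simp only [hmem]

theorem pv_pvVal_self (sets : List (List Int)) (k : Int) (ys : List Int) (x0 : Int) :
    pvVal sets k (ys ++ [x0]) x0 = some (pvOccP sets k x0 ++ [k]) := by
  unfold pvVal
  simp

theorem pv_occ_inner (sets : List (List Int)) (k : Int) :
    ∀ (s ys : List Int) (occ : PySem.Dict Int (List Int)),
      (∀ x, occ.get? x = pvVal sets k ys x) →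
      ∀ x, (s.foldl (fun occ x =>
          match occ.get? x with
          | some idxs => if PySem.List.pyGetD idxs (-1) (-1) != k then occ.insert x (idxs ++ [k]) else occ
          | none => occ.insert x [k]) occ).get? x = pvVal sets k (ys ++ s) x := by
  intro s
  induction s with
  | nil => intro ys occ h x; simpa using h x
  | cons x0 s ih =>
    intro ys occ h x
    simp only [List.foldl_cons]
    have hstep : ∀ x, ((match occ.get? x0 with
        | some idxs => if PySem.List.pyGetD idxs (-1) (-1) != k then occ.insert x0 (idxs ++ [k]) else occ
        | none => occ.insert x0 [k]) : PySem.Dict Int (List Int)).get? x = pvVal sets k (ys ++ [x0]) x := by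
      intro x
      have h0 := h x0
      unfold pvVal at h0
      by_cases hocc : pvOccP sets k x0 = [] ∧ x0 ∉ ys
      · rw [if_pos hocc] at h0
        rw [h0, PySem.Dict.get?_insert]
        by_cases hx : x = x0
        · subst hx
          rw [if_pos rfl, pv_pvVal_self, hocc.1]
          rfl
        · rw [if_neg hx, pv_pvVal_ne sets k hx]
          exact h x
      · rw [if_neg hocc] at h0
        by_cases hys : x0 ∈ ys
        · rw [if_pos hys] at h0
          rw [h0]
          dsimp only
          rw [PySem.List.pyGetD_neg_one_append_singleton]
          simp only [bne_self_eq_false, Bool.false_eq_true, if_false]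
          rw [pv_pvVal_memdup sets k hys x]
          exact h x
        · have hne : pvOccP sets k x0 ≠ [] := by tauto
          rw [if_neg hys, List.append_nil] at h0
          rw [h0]
          dsimp only
          have hlt : PySem.List.pyGetD (pvOccP sets k x0) (-1) (-1) < k := by
            rw [PySem.List.pyGetD_neg_one _ _ hne]
            exact (pv_mem_pvOccP.mp (List.getLast_mem hne)).2.1
          rw [if_pos (by simp only [bne_iff_ne, ne_eq]; omega), PySem.Dict.get?_insert]
          by_cases hx : x = x0
          · subst hx
            rw [if_pos rfl, pv_pvVal_self]
          · rw [if_neg hx, pv_pvVal_ne sets k hx]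
            exact h x
    have := ih (ys ++ [x0]) _ hstep x
    rwa [List.append_assoc, List.singleton_append] at this

theorem pv_occ_outer (sets : List (List Int)) :
    ∀ (m : Nat) (x : Int),
      ((PySem.List.pyRange 0 (m : Int) 1).foldl (fun occ i =>
        (PySem.List.pyGetD sets i []).foldl (fun occ x =>
          match occ.get? x with
          | some idxs => if PySem.List.pyGetD idxs (-1) (-1) != i then occ.insert x (idxs ++ [i]) else occ
          | none => occ.insert x [i]) occ) PySem.Dict.empty).get? x
      = if pvOccP sets (m : Int) x = [] then none else some (pvOccP sets (m : Int) x) := by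
  intro m
  induction m with
  | zero =>
    intro x
    rw [PySem.List.pyRange_one_eq_nil (by norm_num)]
    have h0 : pvOccP sets ((0 : Nat) : Int) x = [] := by
      unfold pvOccP
      rw [PySem.List.pyRange_one_eq_nil (by norm_num)]
      rfl
    rw [h0]
    simp [PySem.Dict.get?_empty]
  | succ m ih =>
    intro x
    have hc : ((m + 1 : Nat) : Int) = (m : Int) + 1 := by push_cast; ring
    rw [hc, PySem.List.pyRange_one_succ_right (by positivity), List.foldl_append]
    simp only [List.foldl_cons, List.foldl_nil]
    have h := pv_occ_inner sets (m : Int) (PySem.List.pyGetD sets (m : Int) []) [] _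
      (fun x => by rw [ih x]; unfold pvVal; split <;> simp_all) x
    rw [List.nil_append] at h
    rw [h]
    unfold pvVal
    rw [pv_pvOccP_succ sets (m : Int) (by positivity) x]
    simp only [pvS]
    by_cases hm : x ∈ PySem.List.pyGetD sets (m : Int) []
    · simp
    · simp

theorem pv_nodup_keys_foldl {κ ν α : Type} [BEq κ] [LawfulBEq κ]
    (f : PySem.Dict κ ν → α → PySem.Dict κ ν)
    (hf : ∀ d x, d.keys.Nodup → (f d x).keys.Nodup) :
    ∀ (l : List α) (d : PySem.Dict κ ν), d.keys.Nodup → (l.foldl f d).keys.Nodup := by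
  intro l
  induction l with
  | nil => intro d hd; exact hd
  | cons hd tl ih => intro d h; exact ih _ (hf d hd h)

theorem pv_occ_get? (sets : List (List Int)) (x : Int) :
    (pvOcc sets).get? x =
      if pvOccP sets sets.length x = [] then none else some (pvOccP sets sets.length x) := by
  exact pv_occ_outer sets sets.length x

theorem pv_occ_keys_nodup (sets : List (List Int)) : (pvOcc sets).keys.Nodup := by
  refine pv_nodup_keys_foldl _ ?_ _ _ PySem.Dict.nodup_keys_empty
  intro d i hd
  refine pv_nodup_keys_foldl _ ?_ _ _ hd
  intro d2 x hd2
  split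
  · split
    · exact PySem.Dict.nodup_keys_insert _ _ _ hd2
    · exact hd2
  · exact PySem.Dict.nodup_keys_insert _ _ _ hd2

theorem pv_occ_mem_keys {sets : List (List Int)} {x : Int} :
    x ∈ (pvOcc sets).keys ↔ pvOccP sets sets.length x ≠ [] := by
  rw [← not_iff_not, not_not, ← PySem.Dict.get?_eq_none_iff_not_mem_keys, pv_occ_get? sets x]
  split <;> simp_all

theorem pv_occ_items (sets : List (List Int)) :
    (pvOcc sets).items = (pvOcc sets).keys.map (fun x => (x, pvOccP sets sets.length x)) := by
  rw [PySem.Dict.items_eq_map_keys (pvOcc sets) (pv_occ_keys_nodup sets) []]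
  refine List.map_congr_left (fun x hx => ?_)
  have h := pv_occ_mem_keys.mp hx
  simp [PySem.Dict.getD, pv_occ_get? sets x, h]

-- cnt characterisation
theorem pv_cnt_eq (sets : List (List Int)) :
    pvCnt sets = (pvE sets).foldl (fun d p => d.insert p (d.getD p 0 + 1)) PySem.Dict.empty := by
  rw [pvE, pv_foldl_flatMap, pvCnt]
  refine PySem.List.foldl_congr_mem _ _ _ _ (fun acc xi _ => ?_)
  rw [List.foldl_map]
  exact pv_nested_pairs_foldl 0 (xi.2.length : Int)
    (fun x y => x.insert (PySem.List.pyGetD xi.2 y.1 0, PySem.List.pyGetD xi.2 y.2 0)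
      (x.getD (PySem.List.pyGetD xi.2 y.1 0, PySem.List.pyGetD xi.2 y.2 0) 0 + 1)) acc

theorem pv_cnt_getD (sets : List (List Int)) (p : Int × Int) :
    (pvCnt sets).getD p 0 = ((pvE sets).count p : Int) := by
  rw [pv_cnt_eq, PySem.Dict.getD_foldl_insert_add_one, PySem.Dict.getD_empty, zero_add]

theorem pv_cnt_keys (sets : List (List Int)) :
    (pvCnt sets).keys = PySem.Set.ofList (pvE sets) := by
  rw [pv_cnt_eq, PySem.Dict.keys_foldl_insert (f := fun d p => d.getD p 0 + 1),
    PySem.Dict.keys_empty, PySem.Set.ofList_eq_foldl]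
  rfl

theorem pv_cnt_keys_nodup (sets : List (List Int)) : (pvCnt sets).keys.Nodup := by
  rw [pv_cnt_keys]; exact PySem.Set.nodup_ofList _

-- counting
theorem pv_strict_getElem {idxs : List Int} (h : idxs.Pairwise (· < ·)) {a b : Nat}
    (ha : a < idxs.length) (hb : b < idxs.length) : idxs[a] < idxs[b] ↔ a < b := by
  rw [List.pairwise_iff_getElem] at h
  constructor
  · intro hlt
    by_contra hab
    rcases Nat.lt_or_ge b a with hba | hba
    · exact absurd (h b a hb ha hba) (by omega)
    · have : a = b := by omega
      subst this; omega
  · exact fun hab => h a b ha hb hab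

theorem pv_mem_local {idxs : List Int} (h : idxs.Pairwise (· < ·)) {q : Int × Int} :
    q ∈ (pvPairs 0 idxs.length).map (fun ab =>
        (PySem.List.pyGetD idxs ab.1 0, PySem.List.pyGetD idxs ab.2 0))
      ↔ q.1 ∈ idxs ∧ q.2 ∈ idxs ∧ q.1 < q.2 := by
  rw [List.mem_map]
  constructor
  · rintro ⟨ab, hab, rfl⟩
    obtain ⟨h1, h2, h3⟩ := pv_mem_pvPairs.mp hab
    obtain ⟨a, ha⟩ := Int.eq_ofNat_of_zero_le h1
    obtain ⟨b, hb⟩ := Int.eq_ofNat_of_zero_le (by omega : (0:Int) ≤ ab.2)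
    rw [ha] at h2 ⊢
    rw [hb] at h3 h2 ⊢
    have hbl : b < idxs.length := by exact_mod_cast h3
    have hal : a < idxs.length := by omega
    have hab2 : a < b := by exact_mod_cast h2
    rw [PySem.List.pyGetD_natCast, PySem.List.pyGetD_natCast,
      List.getD_eq_getElem _ _ hal, List.getD_eq_getElem _ _ hbl]
    exact ⟨List.getElem_mem hal, List.getElem_mem hbl,
      (pv_strict_getElem h hal hbl).mpr hab2⟩
  · rintro ⟨h1, h2, hlt⟩
    obtain ⟨a, hal, hA⟩ := List.mem_iff_getElem.mp h1
    obtain ⟨b, hbl, hB⟩ := List.mem_iff_getElem.mp h2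
    have hab : a < b := by
      have := (pv_strict_getElem h hal hbl).mp (by rw [hA, hB]; exact hlt)
      exact this
    refine ⟨((a : Int), (b : Int)), pv_mem_pvPairs.mpr ⟨by positivity, by dsimp; exact_mod_cast hab, by dsimp; exact_mod_cast hbl⟩, ?_⟩
    rw [PySem.List.pyGetD_natCast, PySem.List.pyGetD_natCast,
      List.getD_eq_getElem _ _ hal, List.getD_eq_getElem _ _ hbl, hA, hB]

theorem pv_local_nodup {idxs : List Int} (h : idxs.Pairwise (· < ·)) :
    ((pvPairs 0 idxs.length).map (fun ab =>
        (PySem.List.pyGetD idxs ab.1 0, PySem.List.pyGetD idxs ab.2 0))).Nodup := by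
  refine List.Nodup.map_on ?_ (pv_pvPairs_nodup 0 (idxs.length : Int))
  intro ab hab cd hcd heq
  obtain ⟨ha1, ha2, ha3⟩ := pv_mem_pvPairs.mp hab
  obtain ⟨hc1, hc2, hc3⟩ := pv_mem_pvPairs.mp hcd
  obtain ⟨a, ha⟩ := Int.eq_ofNat_of_zero_le ha1
  obtain ⟨b, hb⟩ := Int.eq_ofNat_of_zero_le (by omega : (0:Int) ≤ ab.2)
  obtain ⟨c, hc⟩ := Int.eq_ofNat_of_zero_le hc1
  obtain ⟨d, hd⟩ := Int.eq_ofNat_of_zero_le (by omega : (0:Int) ≤ cd.2)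
  have hbl : b < idxs.length := by omega
  have hal : a < idxs.length := by omega
  have hdl : d < idxs.length := by omega
  have hcl : c < idxs.length := by omega
  rw [ha, hb] at heq
  rw [hc, hd] at heq
  rw [PySem.List.pyGetD_natCast, PySem.List.pyGetD_natCast,
    PySem.List.pyGetD_natCast, PySem.List.pyGetD_natCast,
    List.getD_eq_getElem _ _ hal, List.getD_eq_getElem _ _ hbl,
    List.getD_eq_getElem _ _ hcl, List.getD_eq_getElem _ _ hdl] at heq
  have he1 : idxs[a] = idxs[c] := congrArg Prod.fst heq
  have he2 : idxs[b] = idxs[d] := congrArg Prod.snd heq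
  have hac : a = c := by
    have h1 := pv_strict_getElem h hal hcl
    have h2 := pv_strict_getElem h hcl hal
    omega
  have hbd : b = d := by
    have h1 := pv_strict_getElem h hbl hdl
    have h2 := pv_strict_getElem h hdl hbl
    omega
  have : (ab.1, ab.2) = (cd.1, cd.2) := by
    rw [ha, hb, hc, hd, hac, hbd]
  calc ab = (ab.1, ab.2) := rfl
    _ = (cd.1, cd.2) := this
    _ = cd := rfl

theorem pv_local_count {idxs : List Int} (h : idxs.Pairwise (· < ·)) (p : Int × Int) :
    ((pvPairs 0 idxs.length).map (fun ab =>
        (PySem.List.pyGetD idxs ab.1 0, PySem.List.pyGetD idxs ab.2 0))).count p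
      = if p.1 ∈ idxs ∧ p.2 ∈ idxs ∧ p.1 < p.2 then 1 else 0 := by
  split
  · exact List.count_eq_one_of_mem (pv_local_nodup h) ((pv_mem_local h).mpr (by assumption))
  · exact List.count_eq_zero_of_not_mem (fun hm => by
      exact absurd ((pv_mem_local h).mp hm) (by assumption))

theorem pv_sum_ite {α : Type} (l : List α) (q : α → Prop) [DecidablePred q] :
    (l.map (fun x => if q x then (1 : Nat) else 0)).sum = (l.filter (fun x => decide (q x))).length := by
  induction l with
  | nil => rfl
  | cons hd tl ih => by_cases h : q hd <;> simp [h, ih, Nat.add_comm]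

theorem pv_length_eq_of_nodup {α : Type} [DecidableEq α] {l1 l2 : List α}
    (h1 : l1.Nodup) (h2 : l2.Nodup) (h : ∀ x, x ∈ l1 ↔ x ∈ l2) : l1.length = l2.length := by
  rw [← List.toFinset_card_of_nodup h1, ← List.toFinset_card_of_nodup h2]
  congr 1
  ext a
  simp only [List.mem_toFinset]
  exact h a

theorem pv_mem_pvE {sets : List (List Int)} {p : Int × Int} (hp : p ∈ pvE sets) :
    0 ≤ p.1 ∧ p.1 < p.2 ∧ p.2 < (sets.length : Int) := by
  unfold pvE at hp
  rw [List.mem_flatMap] at hp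
  obtain ⟨xi, hxi, hm⟩ := hp
  rw [pv_occ_items, List.mem_map] at hxi
  obtain ⟨x, hxk, rfl⟩ := hxi
  have hpw := pv_pvOccP_pairwise sets sets.length x
  obtain ⟨h1, h2, h3⟩ := (pv_mem_local hpw).mp hm
  obtain ⟨hb1, hb2, _⟩ := pv_mem_pvOccP.mp h1
  obtain ⟨_, hb4, _⟩ := pv_mem_pvOccP.mp h2
  exact ⟨hb1, h3, hb4⟩

theorem pv_E_count (sets : List (List Int)) (p : Int × Int)
    (hv : 0 ≤ p.1 ∧ p.1 < p.2 ∧ p.2 < (sets.length : Int)) :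
    ((pvE sets).count p : Int) = pvC sets p := by
  unfold pvE
  rw [List.count_flatMap, pv_occ_items, List.map_map]
  have hstep : ∀ x ∈ (pvOcc sets).keys,
      ((List.count p ∘ fun xi : Int × List Int =>
          (pvPairs 0 xi.2.length).map (fun ab =>
            (PySem.List.pyGetD xi.2 ab.1 0, PySem.List.pyGetD xi.2 ab.2 0))) ∘
        fun x => (x, pvOccP sets (sets.length : Int) x)) x
      = if x ∈ pvS sets p.1 ∧ x ∈ pvS sets p.2 then 1 else 0 := by
    intro x _
    have hpw := pv_pvOccP_pairwise sets sets.length x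
    show ((pvPairs 0 (pvOccP sets (sets.length : Int) x).length).map (fun ab =>
        (PySem.List.pyGetD (pvOccP sets (sets.length : Int) x) ab.1 0,
         PySem.List.pyGetD (pvOccP sets (sets.length : Int) x) ab.2 0))).count p = _
    rw [pv_local_count hpw p]
    refine if_congr ?_ rfl rfl
    rw [pv_mem_pvOccP, pv_mem_pvOccP]
    constructor
    · rintro ⟨⟨_, _, hm1⟩, ⟨_, _, hm2⟩, _⟩
      exact ⟨hm1, hm2⟩
    · rintro ⟨hm1, hm2⟩
      exact ⟨⟨hv.1, by omega, hm1⟩, ⟨by omega, hv.2.2, hm2⟩, hv.2.1⟩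
  rw [List.map_congr_left hstep, pv_sum_ite]
  show (((pvOcc sets).keys.filter _).length : Int) = ((_ : List Int).length : Int)
  have hlen : ((pvOcc sets).keys.filter
        (fun x => decide (x ∈ pvS sets p.1 ∧ x ∈ pvS sets p.2))).length
      = ((PySem.Set.ofList (pvS sets p.1)).filter
        (fun x => (pvS sets p.2).contains x)).length := by
    refine pv_length_eq_of_nodup ((pv_occ_keys_nodup sets).filter _)
      ((PySem.Set.nodup_ofList _).filter _) ?_
    intro x
    rw [List.mem_filter, List.mem_filter, pv_occ_mem_keys]
    simp only [decide_eq_true_eq, PySem.Set.mem_ofList, List.contains_iff_mem]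
    constructor
    · rintro ⟨_, hm1, hm2⟩
      exact ⟨hm1, hm2⟩
    · rintro ⟨hm1, hm2⟩
      refine ⟨List.ne_nil_of_mem (a := p.1) (pv_mem_pvOccP.mpr ⟨hv.1, by omega, hm1⟩), hm1, hm2⟩
  exact_mod_cast congrArg (Nat.cast : Nat → Int) hlen

-- A-side fold characterisation
theorem pv_stepA_le (c : Int × Int → Int) (L : List (Int × Int)) :
    ∀ st0 : Int × (Int × Int), st0.1 ≤ (L.foldl (pvStepA c) st0).1 ∧
      ∀ p ∈ L, c p ≤ (L.foldl (pvStepA c) st0).1 := by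
  induction L with
  | nil => intro st0; exact ⟨le_refl _, by simp⟩
  | cons hd tl ih =>
    intro st0
    simp only [List.foldl_cons]
    have h1 : st0.1 ≤ (pvStepA c st0 hd).1 := by
      unfold pvStepA; split
      · rename_i hx; exact le_of_lt hx
      · exact le_refl _
    have h2 : c hd ≤ (pvStepA c st0 hd).1 := by
      unfold pvStepA; split
      · exact le_refl _
      · rename_i hx; omega
    obtain ⟨ha, hb⟩ := ih (pvStepA c st0 hd)
    refine ⟨le_trans h1 ha, ?_⟩
    intro p hp
    rcases List.mem_cons.mp hp with rfl | hp
    · exact le_trans h2 ha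
    · exact hb p hp

theorem pv_stepA_split (c : Int × Int → Int) (L : List (Int × Int)) :
    ∀ st0 : Int × (Int × Int), L.foldl (pvStepA c) st0 = st0 ∨
      (∃ L1 L2, L = L1 ++ (L.foldl (pvStepA c) st0).2 :: L2 ∧
        c (L.foldl (pvStepA c) st0).2 = (L.foldl (pvStepA c) st0).1 ∧
        st0.1 < (L.foldl (pvStepA c) st0).1 ∧
        ∀ q ∈ L1, c q < (L.foldl (pvStepA c) st0).1) := by
  induction L with
  | nil => intro st0; left; rfl
  | cons hd tl ih =>
    intro st0
    simp only [List.foldl_cons]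
    by_cases hc : c hd > st0.1
    · have hst : pvStepA c st0 hd = (c hd, hd) := by simp [pvStepA, hc]
      rw [hst]
      rcases ih (c hd, hd) with heq | ⟨L1, L2, hsp, h1, h2, h3⟩
      · right
        refine ⟨[], tl, by simp [heq], by simp [heq], by simp [heq]; omega, by simp⟩
      · right
        refine ⟨hd :: L1, L2, by rw [List.cons_append, ← hsp], h1, by simp at h2; omega, ?_⟩
        intro q hq
        rcases List.mem_cons.mp hq with rfl | hq
        · simp at h2; omega
        · exact h3 q hq
    · have hst : pvStepA c st0 hd = st0 := by simp [pvStepA]; omega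
      rw [hst]
      rcases ih st0 with heq | ⟨L1, L2, hsp, h1, h2, h3⟩
      · left; exact heq
      · right
        refine ⟨hd :: L1, L2, by rw [List.cons_append, ← hsp], h1, h2, ?_⟩
        intro q hq
        rcases List.mem_cons.mp hq with rfl | hq
        · omega
        · exact h3 q hq

-- B-side fold characterisation
theorem pv_stepB_pos {st : Int × (Int × Int)} {pc : (Int × Int) × Int}
    (hb : pvBetter (pc.2, pc.1) st) : pvStepB st pc = (pc.2, pc.1) := by
  unfold pvStepB
  exact if_pos (by unfold pvBetter at hb; exact hb)

theorem pv_stepB_neg {st : Int × (Int × Int)} {pc : (Int × Int) × Int}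
    (hb : ¬ pvBetter (pc.2, pc.1) st) : pvStepB st pc = st := by
  unfold pvStepB
  exact if_neg (by intro h; exact hb (by unfold pvBetter; exact h))

theorem pv_better_irrefl (s : Int × (Int × Int)) : ¬ pvBetter s s := by
  unfold pvBetter; omega

theorem pv_better_trans {a b c : Int × (Int × Int)} :
    pvBetter a b → pvBetter b c → pvBetter a c := by
  unfold pvBetter; omega

theorem pv_better_total (s t : Int × (Int × Int)) :
    s = t ∨ pvBetter s t ∨ pvBetter t s := by
  obtain ⟨a, b, c⟩ := s; obtain ⟨a', b', c'⟩ := t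
  unfold pvBetter
  simp only [Prod.mk.injEq]
  omega

theorem pv_stepB_fold (L : List ((Int × Int) × Int)) :
    ∀ st0 : Int × (Int × Int),
      (L.foldl pvStepB st0) ∈ st0 :: L.map (fun pc => (pc.2, pc.1)) ∧
      ∀ s ∈ st0 :: L.map (fun pc => (pc.2, pc.1)), ¬ pvBetter s (L.foldl pvStepB st0) := by
  induction L with
  | nil =>
    intro st0
    refine ⟨List.mem_cons_self, ?_⟩
    intro s hs
    simp only [List.map_nil, List.mem_singleton] at hs
    subst hs
    exact pv_better_irrefl _
  | cons pc tl ih =>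
    intro st0
    simp only [List.foldl_cons, List.map_cons]
    by_cases hb : pvBetter (pc.2, pc.1) st0
    · rw [pv_stepB_pos hb]
      obtain ⟨hmem, hmax⟩ := ih (pc.2, pc.1)
      refine ⟨List.mem_cons_of_mem _ hmem, ?_⟩
      intro s hs
      rcases List.mem_cons.mp hs with rfl | hs
      · -- s = st0
        intro hbs
        have h1 := hmax (pc.2, pc.1) List.mem_cons_self
        rcases pv_better_total (tl.foldl pvStepB (pc.2, pc.1)) (pc.2, pc.1) with heq | hx | hx
        · rw [heq] at hbs; exact absurd (pv_better_trans hb hbs) (pv_better_irrefl _)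
        · exact absurd (pv_better_trans hb (pv_better_trans hbs hx)) (pv_better_irrefl _)
        · exact h1 hx
      · exact hmax s hs
    · rw [pv_stepB_neg hb]
      obtain ⟨hmem, hmax⟩ := ih st0
      have hst0 : ¬ pvBetter st0 (tl.foldl pvStepB st0) := hmax st0 List.mem_cons_self
      constructor
      · rcases List.mem_cons.mp hmem with heq | hmem'
        · rw [heq]; exact List.mem_cons_self
        · exact List.mem_cons_of_mem _ (List.mem_cons_of_mem _ hmem')
      · intro s hs
        rcases List.mem_cons.mp hs with rfl | hs
        · exact hst0
        · rcases List.mem_cons.mp hs with rfl | hs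
          · -- s = (pc.2, pc.1)
            intro hbs
            rcases pv_better_total st0 (tl.foldl pvStepB st0) with heq | hx | hx
            · rw [← heq] at hbs; exact hb hbs
            · exact hst0 hx
            · exact hb (pv_better_trans hbs hx)
          · exact hmax s (List.mem_cons_of_mem _ hs)

-- assembly
theorem pv_main (sets : List (List Int)) : kooslubajad sets = kooslubajad_alt sets := by
  rw [pv_kooslubajad_eq, pv_kooslubajad_alt_eq]
  have hfold : (pvPairs 0 (sets.length : Int)).foldl (pvStepA (pvC sets)) ((0:Int),((0:Int),(1:Int)))
      = (pvCnt sets).items.foldl pvStepB ((0:Int),((0:Int),(1:Int))) := by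
    have hkey : ∀ q ∈ (pvCnt sets).keys,
        (0 ≤ q.1 ∧ q.1 < q.2 ∧ q.2 < (sets.length : Int)) ∧
          (pvCnt sets).getD q 0 = pvC sets q ∧ 1 ≤ pvC sets q := by
      intro q hq
      rw [pv_cnt_keys, PySem.Set.mem_ofList] at hq
      have hv := pv_mem_pvE hq
      have hcount : 0 < (pvE sets).count q := List.count_pos_iff.mpr hq
      have hEc := pv_E_count sets q hv
      refine ⟨hv, by rw [pv_cnt_getD sets q, hEc], by rw [← hEc]; exact_mod_cast hcount⟩
    have hmemkey : ∀ q, (0 ≤ q.1 ∧ q.1 < q.2 ∧ q.2 < (sets.length : Int)) →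
        1 ≤ pvC sets q → q ∈ (pvCnt sets).keys := by
      intro q hv h1
      rw [pv_cnt_keys, PySem.Set.mem_ofList]
      have hEc := pv_E_count sets q hv
      have hpos : 0 < (pvE sets).count q := by
        rw [← hEc] at h1
        exact_mod_cast h1
      exact List.count_pos_iff.mp hpos
    have hitems : (pvCnt sets).items = (pvCnt sets).keys.map (fun q => (q, pvC sets q)) := by
      rw [PySem.Dict.items_eq_map_keys _ (pv_cnt_keys_nodup sets) 0]
      exact List.map_congr_left (fun q hq => by rw [(hkey q hq).2.1])
    obtain ⟨hle0, hleall⟩ := pv_stepA_le (pvC sets) (pvPairs 0 (sets.length : Int))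
      ((0:Int),((0:Int),(1:Int)))
    obtain ⟨hBmem, hBmax⟩ := pv_stepB_fold ((pvCnt sets).items) ((0:Int),((0:Int),(1:Int)))
    rcases pv_stepA_split (pvC sets) (pvPairs 0 (sets.length : Int)) ((0:Int),((0:Int),(1:Int)))
      with heq | ⟨L1, L2, hsp, hcR, hpos, hL1⟩
    · -- no pair has a positive intersection: cnt is empty and both folds return the initial state
      have hkeys_nil : (pvCnt sets).keys = [] := by
        rw [List.eq_nil_iff_forall_not_mem]
        intro q hq
        obtain ⟨hv, _, h1⟩ := hkey q hq
        have hqP : q ∈ pvPairs 0 (sets.length : Int) := pv_mem_pvPairs.mpr hv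
        have h2 := hleall q hqP
        rw [heq] at h2
        dsimp at h2
        omega
      have hitems_nil : (pvCnt sets).items = [] := by rw [hitems, hkeys_nil]; rfl
      rw [heq, hitems_nil]
      rfl
    · -- A's result (M, pA): show B's fold lands on the same state
      set R := (pvPairs 0 (sets.length : Int)).foldl (pvStepA (pvC sets))
        ((0:Int),((0:Int),(1:Int))) with hRdef
      set B := (pvCnt sets).items.foldl pvStepB ((0:Int),((0:Int),(1:Int))) with hBdef
      have hpos' : 0 < R.1 := by dsimp at hpos; omega
      have hpA_P : R.2 ∈ pvPairs 0 (sets.length : Int) := by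
        rw [hsp]
        exact List.mem_append_right _ List.mem_cons_self
      have hvA := pv_mem_pvPairs.mp hpA_P
      have hpA_key := hmemkey _ hvA (by rw [hcR]; omega)
      have hsA : (R.1, R.2) ∈
          ((0:Int),((0:Int),(1:Int))) :: ((pvCnt sets).items.map (fun pc => (pc.2, pc.1))) := by
        refine List.mem_cons_of_mem _ ?_
        rw [hitems, List.map_map]
        exact List.mem_map.mpr ⟨R.2, hpA_key, by dsimp; rw [hcR]⟩
      have hnb := hBmax _ hsA
      rcases List.mem_cons.mp hBmem with hBst0 | hBst
      · exfalso
        rw [hBst0] at hnb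
        exact hnb (Or.inl hpos')
      · rw [hitems, List.map_map] at hBst
        obtain ⟨q, hqk, hqB⟩ := List.mem_map.mp hBst
        dsimp at hqB
        obtain ⟨hvq, _, h1q⟩ := hkey q hqk
        have hcq_le := hleall q (pv_mem_pvPairs.mpr hvq)
        rw [← hqB] at hnb
        unfold pvBetter at hnb
        dsimp at hnb
        have hnb1 : ¬ (pvC sets q < R.1) := fun h => hnb (Or.inl h)
        have hcqM : pvC sets q = R.1 := by omega
        have hnb2 : ¬ (R.2.1 < q.1 ∨ (R.2.1 = q.1 ∧ R.2.2 < q.2)) :=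
          fun h => hnb (Or.inr ⟨hcqM.symm, h⟩)
        have hqP : q ∈ L1 ++ R.2 :: L2 := by
          rw [← hsp]
          exact pv_mem_pvPairs.mpr hvq
        rcases List.mem_append.mp hqP with hq1 | hq2
        · have := hL1 q hq1
          omega
        · rcases List.mem_cons.mp hq2 with rfl | hq3
          · rw [← hqB, hcqM]
          · exfalso
            have hpw := pv_pvPairs_pairwise 0 (sets.length : Int)
            rw [hsp, List.pairwise_append] at hpw
            have hlex := (List.pairwise_cons.mp hpw.2.1).1 q hq3
            unfold pvLexLt at hlex
            exact hnb2 hlex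
  rw [hfold]



-- ===== VERDICT (by name: the statement is the Claim_ definition above) =====
theorem kooslubajad_spec : Claim_equal_kooslubajad := by
  intro sets _
  exact pv_main sets
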